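-- pv_equiv track=rewrite | github.com/aryashubhavi/ExaminerByNIH | Tasks 2/Examiner3_6/lib/examiner/cpt.py | cptSequenceCheck
-- ===== SOURCE A (Python) =====
-- def cptSequenceCheck(trials):
--     """utility method to validate the sequence ordering
--
--     The cpt trials are handled to ensure that there are no sequences of targets longer than 10
--     and no sequences of nontargets longer than 2.
--
--     """
--     targetSequence = 0
--     nontargetSequence = 0
--
--     for trial in trials:
--         if(trial['stimulus']=='target'):
--             targetSequence+=1
--             nontargetSequence=0
--             if(targetSequence > 10):
--                 return False
--         else:
--             nontargetSequence+=1
--             targetSequence=0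
--             if(nontargetSequence>2):
--                 return False
--
--     return True
-- ===== SOURCE B (Python) =====
-- def cptSequenceCheck(trials):
--     # Two-phase: run-length-encode the target/nontarget sequence, then check every run
--     # against its limit (10 for targets, 2 for nontargets).
--     runs = []
--     for trial in trials:
--         k = trial['stimulus'] == 'target'
--         if runs and runs[-1][0] == k:
--             runs[-1][1] += 1
--         else:
--             runs.append([k, 1])
--     return all(n <= (10 if k else 2) for k, n in runs)
-- ===== Notes on version B (the rewrite author's own statement) =====
-- stated objective: alternative
-- what changed: B replaces A's single pass with two mutually-resetting run counters and early returns by a two-phase algorithm: run-length-encode the target/nontarget sequence, then check every run against its limit with all().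
import Mathlib
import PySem

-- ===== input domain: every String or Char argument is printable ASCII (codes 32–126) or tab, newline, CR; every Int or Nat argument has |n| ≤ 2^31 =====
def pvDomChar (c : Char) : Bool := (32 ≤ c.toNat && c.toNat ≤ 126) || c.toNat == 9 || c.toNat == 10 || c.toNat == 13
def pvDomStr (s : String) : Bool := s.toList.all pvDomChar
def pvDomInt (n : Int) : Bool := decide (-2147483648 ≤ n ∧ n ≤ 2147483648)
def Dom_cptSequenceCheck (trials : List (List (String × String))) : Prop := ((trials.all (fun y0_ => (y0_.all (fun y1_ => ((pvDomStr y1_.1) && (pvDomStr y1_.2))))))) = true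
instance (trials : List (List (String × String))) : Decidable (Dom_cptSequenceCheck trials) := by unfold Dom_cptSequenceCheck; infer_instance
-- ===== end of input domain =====

-- B re-implements A's run-limit check in two phases (run-length encode, then check all runs);
-- equal to A wherever every trial carries a 'stimulus' key (Pre_); same asymptotic cost.


-- ===== PORT A =====
-- A's loop with the two counters; a missing 'stimulus' key is a KeyError in Python
-- (excluded by Pre_); the port returns false there (any value would do).
def cptA_loop : List (List (String × String)) → Int → Int → Bool
  | [], _, _ => true
  | trial :: rest, targetSequence, nontargetSequence =>
    match List.lookup "stimulus" trial with
    | none => false  -- Python: KeyError (outside Pre_)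
    | some s =>
      if s = "target" then
        if targetSequence + 1 > 10 then false
        else cptA_loop rest (targetSequence + 1) 0
      else
        if nontargetSequence + 1 > 2 then false
        else cptA_loop rest 0 (nontargetSequence + 1)

def cptSequenceCheck (trials : List (List (String × String))) : Bool :=
  cptA_loop trials 0 0

-- ===== PORT B =====
-- Phase 1 of Source B: run-length encoding. Python appends at the END of `runs` and bumps
-- `runs[-1]`; the port keeps the MOST RECENT run at the HEAD and reverses at the end.
def cptB_step (runs : List (Bool × Int)) (trial : List (String × String)) : List (Bool × Int) :=
  let k : Bool := decide (List.lookup "stimulus" trial = some "target")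
  match runs with
  | (k', n) :: tail => if k' = k then (k', n + 1) :: tail else (k, 1) :: (k', n) :: tail
  | [] => [(k, 1)]

-- Phase 2 of Source B: all(n <= (10 if k else 2) for k, n in runs)
def cptB_ok (g : Bool × Int) : Bool := decide (g.2 ≤ if g.1 then (10 : Int) else 2)

def cptSequenceCheck_alt (trials : List (List (String × String))) : Bool :=
  ((trials.foldl cptB_step []).reverse).all cptB_ok

-- ===== PRECONDITION & SPEC =====
-- Pre_ excludes inputs containing a trial without a 'stimulus' key: there Python A raises
-- KeyError unless an earlier over-long run triggers the early return first, so its value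
-- depends on where the malformed trial sits; B raises KeyError on such inputs.
def Pre_cptSequenceCheck (trials : List (List (String × String))) : Prop :=
  ∀ t ∈ trials, (List.lookup "stimulus" t).isSome = true
instance (trials : List (List (String × String))) : Decidable (Pre_cptSequenceCheck trials) := by
  unfold Pre_cptSequenceCheck; infer_instance

def pvWitness_cptSequenceCheck : (List (List (String × String))) :=
  [[("stimulus", "target")], [("stimulus", "nontarget")]]

def Spec_cptSequenceCheck (trials : List (List (String × String))) (out : Bool) : Prop := out = cptSequenceCheck_alt trials
instance (trials : List (List (String × String))) (out : Bool) : Decidable (Spec_cptSequenceCheck trials out) := by unfold Spec_cptSequenceCheck; infer_instance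

-- ===== CLAIM (what is proved, stated in full; the proofs are below) =====
def Claim_equal_cptSequenceCheck : Prop := ∀ (trials : List (List (String × String))), Dom_cptSequenceCheck trials → Pre_cptSequenceCheck trials → Spec_cptSequenceCheck trials (cptSequenceCheck trials)

-- ===== LEMMAS AND PROOFS =====

-- a run already over its limit (or any bad run in the accumulator) stays bad through the fold
theorem cptB_bad_preserved (rest : List (List (String × String))) :
    ∀ acc : List (Bool × Int), acc.all cptB_ok = false →
      (rest.foldl cptB_step acc).all cptB_ok = false := by
  induction rest with
  | nil => intro acc h; simpa using h
  | cons t rest ih =>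
    intro acc h
    simp only [List.foldl_cons]
    apply ih
    match acc with
    | [] => simp at h
    | (k', n) :: tail =>
      simp only [cptB_step]
      simp only [List.all_cons, Bool.and_eq_false_iff] at h
      split
      · simp only [List.all_cons, Bool.and_eq_false_iff]
        rcases h with h | h
        · left; simp only [cptB_ok, decide_eq_false_iff_not, not_le] at h ⊢; omega
        · right; exact h
      · simp only [List.all_cons, Bool.and_eq_false_iff]
        rcases h with h | h
        · right; left; exact h
        · right; right; exact h

-- loop invariant: A's counters encode the current run (k, n); tail holds the finished runs, all OK
theorem cptAB (rest : List (List (String × String))) :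
    ∀ (k : Bool) (n : Int) (tail : List (Bool × Int)),
      (∀ t ∈ rest, (List.lookup "stimulus" t).isSome = true) →
      1 ≤ n → n ≤ (if k then (10 : Int) else 2) → tail.all cptB_ok = true →
      cptA_loop rest (if k then n else 0) (if k then 0 else n)
        = (rest.foldl cptB_step ((k, n) :: tail)).all cptB_ok := by
  induction rest with
  | nil =>
    intro k n tail _ h1 h2 htail
    simp [cptA_loop, List.all_cons, htail, cptB_ok, h2]
  | cons t rest ih =>
    intro k n tail hpre h1 h2 htail
    obtain ⟨s, hs⟩ := Option.isSome_iff_exists.mp (hpre t (by simp))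
    have hpre' : ∀ t' ∈ rest, (List.lookup "stimulus" t').isSome = true := by
      intro t' ht'; exact hpre t' (by simp [ht'])
    simp only [List.foldl_cons]
    by_cases hk' : s = "target"
    · subst hk'
      cases k with
      | true =>
        rw [if_pos rfl] at h2
        rw [if_pos rfl, if_pos rfl]
        have hstep : cptB_step ((true, n) :: tail) t = (true, n + 1) :: tail := by
          simp [cptB_step, hs]
        rw [hstep]
        simp only [cptA_loop, hs]
        rw [if_pos trivial]
        by_cases hlim : n + 1 > 10
        · rw [if_pos hlim, cptB_bad_preserved]
          simp only [List.all_cons, Bool.and_eq_false_iff]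
          left; simp only [cptB_ok]; simp; omega
        · rw [if_neg hlim]
          have := ih true (n + 1) tail hpre' (by omega) (by rw [if_pos rfl]; omega) htail
          rw [if_pos rfl, if_pos rfl] at this
          exact this
      | false =>
        rw [if_neg (by decide)] at h2
        rw [if_neg (by decide), if_neg (by decide)]
        have hstep : cptB_step ((false, n) :: tail) t = (true, 1) :: (false, n) :: tail := by
          simp [cptB_step, hs]
        rw [hstep]
        simp only [cptA_loop, hs]
        rw [if_pos trivial]
        rw [if_neg (by norm_num : ¬((0 : Int) + 1 > 10))]
        have htail' : ((false, n) :: tail).all cptB_ok = true := by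
          simp only [List.all_cons, htail, Bool.and_true]
          simp only [cptB_ok]; simp; omega
        have := ih true 1 ((false, n) :: tail) hpre' (by norm_num)
          (by rw [if_pos rfl]; norm_num) htail'
        rw [if_pos rfl, if_pos rfl] at this
        exact this
    · cases k with
      | true =>
        rw [if_pos rfl] at h2
        rw [if_pos rfl, if_pos rfl]
        have hstep : cptB_step ((true, n) :: tail) t = (false, 1) :: (true, n) :: tail := by
          simp [cptB_step, hs, hk']
        rw [hstep]
        simp only [cptA_loop, hs]
        rw [if_neg hk']
        rw [if_neg (by norm_num : ¬((0 : Int) + 1 > 2))]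
        have htail' : ((true, n) :: tail).all cptB_ok = true := by
          simp only [List.all_cons, htail, Bool.and_true]
          simp only [cptB_ok]; simp; omega
        have := ih false 1 ((true, n) :: tail) hpre' (by norm_num)
          (by rw [if_neg (by decide)]; norm_num) htail'
        rw [if_neg (by decide), if_neg (by decide)] at this
        exact this
      | false =>
        rw [if_neg (by decide)] at h2
        rw [if_neg (by decide), if_neg (by decide)]
        have hstep : cptB_step ((false, n) :: tail) t = (false, n + 1) :: tail := by
          simp [cptB_step, hs, hk']
        rw [hstep]
        simp only [cptA_loop, hs]
        rw [if_neg hk']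
        by_cases hlim : n + 1 > 2
        · rw [if_pos hlim, cptB_bad_preserved]
          simp only [List.all_cons, Bool.and_eq_false_iff]
          left; simp only [cptB_ok]; simp; omega
        · rw [if_neg hlim]
          have := ih false (n + 1) tail hpre' (by omega) (by rw [if_neg (by decide)]; omega) htail
          rw [if_neg (by decide), if_neg (by decide)] at this
          exact this

-- ===== VERDICT (by name: the statement is the Claim_ definition above) =====
theorem cptSequenceCheck_spec : Claim_equal_cptSequenceCheck := by
  intro trials _ hpre
  unfold Spec_cptSequenceCheck cptSequenceCheck cptSequenceCheck_alt
  rw [List.all_reverse]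
  cases trials with
  | nil => simp [cptA_loop]
  | cons t rest =>
    obtain ⟨s, hs⟩ := Option.isSome_iff_exists.mp (hpre t (by simp))
    have hpre' : ∀ t' ∈ rest, (List.lookup "stimulus" t').isSome = true := by
      intro t' ht'; exact hpre t' (by simp [ht'])
    simp only [List.foldl_cons]
    by_cases hk' : s = "target"
    · subst hk'
      have hstep : cptB_step [] t = [(true, 1)] := by simp [cptB_step, hs]
      rw [hstep]
      simp only [cptA_loop, hs]
      rw [if_pos trivial]
      rw [if_neg (by norm_num : ¬((0 : Int) + 1 > 10))]
      have := cptAB rest true 1 [] hpre' (by norm_num) (by rw [if_pos rfl]; norm_num) (by simp)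
      rw [if_pos rfl, if_pos rfl] at this
      exact this
    · have hstep : cptB_step [] t = [(false, 1)] := by simp [cptB_step, hs, hk']
      rw [hstep]
      simp only [cptA_loop, hs]
      rw [if_neg hk']
      rw [if_neg (by norm_num : ¬((0 : Int) + 1 > 2))]
      have := cptAB rest false 1 [] hpre' (by norm_num) (by rw [if_neg (by decide)]; norm_num) (by simp)
      rw [if_neg (by decide), if_neg (by decide)] at this
      exact this
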